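-- pv_equiv track=rewrite | github.com/hisiwen/UNICC-AI-Agent | orchestrator/aggregate.py | derive_final_decision
-- ===== SOURCE A (Python) =====
-- from typing import Any, Dict, List
--
-- DECISION_ORDER = {
--     "Reject": 3,
--     "Flag for Review": 2,
--     "Approve with Conditions": 1,
--     "Approve": 0,
-- }
--
-- def derive_final_decision(results: List[Dict[str, Any]]) -> str:
--     highest = 0
--     final = "Approve"
--
--     for result in results:
--         parsed = result.get("parsed") or {}
--         decision = parsed.get("recommendation")
--         if decision in DECISION_ORDER and DECISION_ORDER[decision] > highest:
--             highest = DECISION_ORDER[decision]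
--             final = decision
--
--     if highest == 0 and results:
--         return "Approve with Conditions"
--     return final
-- ===== SOURCE B (Python) =====
-- def derive_final_decision(results):
--     present = {(r.get("parsed") or {}).get("recommendation") for r in results}
--     if "Reject" in present:
--         return "Reject"
--     if "Flag for Review" in present:
--         return "Flag for Review"
--     return "Approve with Conditions" if results else "Approve"
-- ===== Notes on version B (the rewrite author's own statement) =====
-- stated objective: simpler
-- what changed: Replaces the running-max fold over DECISION_ORDER priorities (tracking highest and final) with a one-shot set of present recommendations resolved by a priority membership chain, merging the 'Approve with Conditions' case with the non-empty fallback.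
import Mathlib
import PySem

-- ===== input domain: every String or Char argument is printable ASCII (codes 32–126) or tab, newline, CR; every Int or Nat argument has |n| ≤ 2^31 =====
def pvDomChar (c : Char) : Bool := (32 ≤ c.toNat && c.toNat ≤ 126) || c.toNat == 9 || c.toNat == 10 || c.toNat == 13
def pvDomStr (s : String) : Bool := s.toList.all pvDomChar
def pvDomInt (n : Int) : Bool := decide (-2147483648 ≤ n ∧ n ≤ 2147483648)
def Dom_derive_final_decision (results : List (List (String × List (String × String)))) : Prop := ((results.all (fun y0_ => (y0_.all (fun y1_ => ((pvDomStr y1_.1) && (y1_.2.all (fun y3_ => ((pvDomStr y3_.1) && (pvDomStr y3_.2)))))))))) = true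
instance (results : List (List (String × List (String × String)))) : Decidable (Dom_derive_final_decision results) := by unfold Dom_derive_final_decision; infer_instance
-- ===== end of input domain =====

-- B replaces A's running-max fold over DECISION_ORDER with a one-shot set of present
-- recommendations resolved by a priority membership chain (objective: simpler).

-- ===== PORT A =====
def pvDecisionOrder : PySem.Dict String Int :=
  PySem.Dict.mk [("Reject", 3), ("Flag for Review", 2), ("Approve with Conditions", 1), ("Approve", 0)]

-- one iteration of A's for-loop; state = (highest, final)
def pvStepA (st : Int × String) (result : List (String × List (String × String))) : Int × String :=
  -- `result.get("parsed") or {}`: a missing key and an empty dict both give {}, so getD [] is exact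
  let parsed := (PySem.Dict.mk result).getD "parsed" []
  match (PySem.Dict.mk parsed).get? "recommendation" with
  | none => st          -- `None in DECISION_ORDER` is False
  | some d =>
    match pvDecisionOrder.get? d with
    | none => st        -- `decision in DECISION_ORDER` is False
    | some v => if st.1 < v then (v, d) else st

def derive_final_decision (results : List (List (String × List (String × String)))) : String :=
  let st := results.foldl pvStepA (0, "Approve")
  if st.1 = 0 ∧ results ≠ [] then "Approve with Conditions" else st.2

-- ===== PORT B =====
-- (r.get("parsed") or {}).get("recommendation")
def pvRec (r : List (String × List (String × String))) : Option String :=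
  (PySem.Dict.mk ((PySem.Dict.mk r).getD "parsed" [])).get? "recommendation"

def derive_final_decision_alt (results : List (List (String × List (String × String)))) : String :=
  let present : PySem.Set (Option String) := PySem.Set.ofList (results.map pvRec)
  if (some "Reject") ∈ present then "Reject"
  else if (some "Flag for Review") ∈ present then "Flag for Review"
  else if results ≠ [] then "Approve with Conditions" else "Approve"

-- ===== PRECONDITION & SPEC =====
def Spec_derive_final_decision (results : List (List (String × List (String × String)))) (out : String) : Prop := out = derive_final_decision_alt results
instance (results : List (List (String × List (String × String)))) (out : String) : Decidable (Spec_derive_final_decision results out) := by unfold Spec_derive_final_decision; infer_instance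

-- ===== CLAIM (what is proved, stated in full; the proofs are below) =====
def Claim_equal_derive_final_decision : Prop := ∀ (results : List (List (String × List (String × String)))), Dom_derive_final_decision results → Spec_derive_final_decision results (derive_final_decision results)

-- ===== LEMMAS AND PROOFS =====

-- closed form of A's loop from an arbitrary nonnegative state, in terms of which
-- recommendations occur in the list
def pvOut (h : Int) (f : String) (recs : List (Option String)) : Int × String :=
  if h < 3 ∧ (some "Reject") ∈ recs then (3, "Reject")
  else if h < 2 ∧ (some "Flag for Review") ∈ recs then (2, "Flag for Review")
  else if h < 1 ∧ (some "Approve with Conditions") ∈ recs then (1, "Approve with Conditions")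
  else (h, f)

lemma pvStepA_rec (st : Int × String) (r : List (String × List (String × String))) :
    pvStepA st r = match pvRec r with
      | none => st
      | some d => match pvDecisionOrder.get? d with
        | none => st
        | some v => if st.1 < v then (v, d) else st := by
  simp [pvStepA, pvRec]

lemma pvStepA_none (st : Int × String) {r : List (String × List (String × String))}
    (he : pvRec r = none) : pvStepA st r = st := by
  rw [pvStepA_rec, he]

lemma pvStepA_some (st : Int × String) {r : List (String × List (String × String))}
    {d : String} {v : Int} (he : pvRec r = some d)
    (hv : pvDecisionOrder.get? d = some v) :
    pvStepA st r = if st.1 < v then (v, d) else st := by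
  rw [pvStepA_rec, he]; simp only [hv]

lemma pvStepA_unknown (st : Int × String) {r : List (String × List (String × String))}
    {d : String} (he : pvRec r = some d)
    (hv : pvDecisionOrder.get? d = none) : pvStepA st r = st := by
  rw [pvStepA_rec, he]; simp only [hv]

lemma pvFold_char (l : List (List (String × List (String × String)))) :
    ∀ (h : Int) (f : String), 0 ≤ h →
      l.foldl pvStepA (h, f) = pvOut h f (l.map pvRec) := by
  induction l with
  | nil => intro h f hh; simp [pvOut]
  | cons r t ih =>
    intro h f hh
    simp only [List.foldl_cons, List.map_cons]
    rcases he : pvRec r with _ | d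
    · rw [pvStepA_none _ he, ih h f hh]
      simp [pvOut]
    · by_cases h1 : d = "Reject"
      · subst h1
        rw [pvStepA_some _ he (show pvDecisionOrder.get? "Reject" = some 3 from rfl)]
        dsimp only
        by_cases hlt : h < 3
        · rw [if_pos hlt, ih 3 "Reject" (by omega)]
          simp [pvOut, hlt]
        · rw [if_neg hlt, ih h f hh]
          have ha : ¬ h < 2 := by omega
          have hb : ¬ h < 1 := by omega
          simp [pvOut, hlt, ha, hb]
      · by_cases h2 : d = "Flag for Review"
        · subst h2
          rw [pvStepA_some _ he (show pvDecisionOrder.get? "Flag for Review" = some 2 from rfl)]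
          dsimp only
          by_cases hlt : h < 2
          · rw [if_pos hlt, ih 2 "Flag for Review" (by omega)]
            by_cases hRt : (some "Reject") ∈ t.map pvRec
            · simp [pvOut, hRt, show h < 3 by omega]
            · simp [pvOut, hRt, hlt]
          · rw [if_neg hlt, ih h f hh]
            have hb : ¬ h < 1 := by omega
            by_cases hRt : (some "Reject") ∈ t.map pvRec
            · by_cases hc : h < 3 <;> simp [pvOut, hRt, hlt, hb, hc]
            · simp [pvOut, hRt, hlt, hb]
        · by_cases h3 : d = "Approve with Conditions"
          · subst h3
            rw [pvStepA_some _ he (show pvDecisionOrder.get? "Approve with Conditions" = some 1 from rfl)]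
            dsimp only
            by_cases hlt : h < 1
            · rw [if_pos hlt, ih 1 "Approve with Conditions" (by omega)]
              by_cases hRt : (some "Reject") ∈ t.map pvRec
              · simp [pvOut, hRt, show h < 3 by omega]
              · by_cases hFt : (some "Flag for Review") ∈ t.map pvRec
                · simp [pvOut, hRt, hFt, show h < 2 by omega]
                · simp [pvOut, hRt, hFt, hlt]
            · rw [if_neg hlt, ih h f hh]
              by_cases hRt : (some "Reject") ∈ t.map pvRec
              · by_cases hc : h < 3 <;> simp [pvOut, hRt, hlt, hc]
              · by_cases hFt : (some "Flag for Review") ∈ t.map pvRec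
                · by_cases hb : h < 2 <;> simp [pvOut, hRt, hFt, hlt, hb]
                · simp [pvOut, hRt, hFt, hlt]
          · by_cases h4 : d = "Approve"
            · subst h4
              rw [pvStepA_some _ he (show pvDecisionOrder.get? "Approve" = some 0 from rfl)]
              dsimp only
              rw [if_neg (by omega : ¬ h < 0), ih h f hh]
              simp [pvOut]
            · have h1' : "Reject" ≠ d := fun e => h1 e.symm
              have h2' : "Flag for Review" ≠ d := fun e => h2 e.symm
              have h3' : "Approve with Conditions" ≠ d := fun e => h3 e.symm
              have h4' : "Approve" ≠ d := fun e => h4 e.symm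
              have hnone : pvDecisionOrder.get? d = none := by
                rw [pvDecisionOrder]
                repeat rw [PySem.Dict.get?_mk_cons]
                simp [PySem.Dict.get?, h1', h2', h3', h4']
              rw [pvStepA_unknown _ he hnone, ih h f hh]
              simp [pvOut, h1', h2', h3']

-- ===== VERDICT (by name: the statement is the Claim_ definition above) =====
theorem derive_final_decision_spec : Claim_equal_derive_final_decision := by
  intro results _
  unfold Spec_derive_final_decision derive_final_decision derive_final_decision_alt
  rw [pvFold_char results 0 "Approve" le_rfl]
  simp only [PySem.Set.mem_ofList, pvOut]
  by_cases hR : (some "Reject") ∈ results.map pvRec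
  · simp [hR]
  · by_cases hF : (some "Flag for Review") ∈ results.map pvRec
    · simp [hR, hF]
    · by_cases hC : (some "Approve with Conditions") ∈ results.map pvRec
      · have hne : results ≠ [] := by
          rintro rfl; simp at hC
        simp [hR, hF, hC, hne]
      · by_cases hne : results = []
        · subst hne; simp
        · simp [hR, hF, hC, hne]
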